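-- pv_equiv track=rewrite | github.com/chryss/ipalizer | ipalizer.py | nextmatch
-- ===== SOURCE A (Python) =====
-- def nextmatch(string, keys):
-- 		"""Returns longest key that matches start of string or None
--
-- 		helper function for tokenize()
-- 		"""
-- 		longest = None
-- 		for i in range(len(string)):
-- 				substr = string[:i+1]
-- 				candidates = [k for k in keys if k.startswith(substr)]
-- 				if not candidates:
-- 						break
-- 				if substr in keys:
-- 						longest = substr
-- 		return longest
-- ===== SOURCE B (Python) =====
-- def nextmatch(string, keys):
--     """Returns longest key that matches start of string or None
--
--     Single pass over the keys: keep the longest non-empty key that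
--     is a prefix of string.
--     """
--     longest = None
--     for k in keys:
--         if k and string.startswith(k) and (longest is None or len(k) > len(longest)):
--             longest = k
--     return longest
-- ===== Notes on version B (the rewrite author's own statement) =====
-- stated objective: faster
-- what changed: B scans the key list once keeping the longest non-empty key that is a prefix of string, instead of A's loop that grows prefixes of string, rebuilds a startswith-filtered candidate list at each prefix length, and breaks when it empties.
import Mathlib
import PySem

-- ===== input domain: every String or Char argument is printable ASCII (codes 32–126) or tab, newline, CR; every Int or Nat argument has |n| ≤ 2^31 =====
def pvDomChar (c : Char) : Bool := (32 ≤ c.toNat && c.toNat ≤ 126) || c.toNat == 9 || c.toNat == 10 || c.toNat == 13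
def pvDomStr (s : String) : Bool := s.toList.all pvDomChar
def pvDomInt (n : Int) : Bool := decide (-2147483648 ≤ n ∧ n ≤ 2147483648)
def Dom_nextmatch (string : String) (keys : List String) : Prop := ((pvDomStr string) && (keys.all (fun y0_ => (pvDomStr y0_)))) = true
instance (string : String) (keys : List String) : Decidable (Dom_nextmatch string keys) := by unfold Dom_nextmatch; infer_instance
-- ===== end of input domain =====

-- B replaces A's prefix-growing loop (with candidate filtering and break) by a single
-- pass over the keys keeping the longest non-empty key that is a prefix of string (measured faster in a timing run).


-- ===== PORT A =====
-- the for-loop with its break, as structural recursion over the remaining range list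
def nextmatchGo (string : String) (keys : List String) : List Int → Option String → Option String
  | [], longest => longest
  | i :: rest, longest =>
    let substr := PySem.Str.slice string none (some (i + 1))
    let candidates := keys.filter (fun k => PySem.Str.startswith k substr)
    if candidates = [] then longest
    else nextmatchGo string keys rest
      (if keys.contains substr then some substr else longest)

def nextmatch (string : String) (keys : List String) : Option String :=
  nextmatchGo string keys (PySem.List.pyRange 0 ((PySem.Str.len string : Int)) 1) none

-- ===== PORT B =====
def nextmatch_alt (string : String) (keys : List String) : Option String :=
  keys.foldl (fun longest k =>
    if (k ≠ "" && PySem.Str.startswith string k &&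
        (match longest with
         | none => true
         | some m => decide (PySem.Str.len m < PySem.Str.len k)))
    then some k else longest) none

-- ===== PRECONDITION & SPEC =====
def Spec_nextmatch (string : String) (keys : List String) (out : Option String) : Prop := out = nextmatch_alt string keys
instance (string : String) (keys : List String) (out : Option String) : Decidable (Spec_nextmatch string keys out) := by unfold Spec_nextmatch; infer_instance

-- ===== CLAIM (what is proved, stated in full; the proofs are below) =====
def Claim_equal_nextmatch : Prop := ∀ (string : String) (keys : List String), Dom_nextmatch string keys → Spec_nextmatch string keys (nextmatch string keys)

-- ===== LEMMAS AND PROOFS =====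

-- k is a usable key for string s: non-empty and a prefix of s
def pvValid (s k : List Char) : Prop := k ≠ [] ∧ k <+: s

-- r is the (unique) answer among the keys whose length is ≤ c
def pvGoodUpTo (string : String) (keys : List String) (c : Nat) : Option String → Prop
  | none => ∀ k ∈ keys, k.toList.length ≤ c → ¬ pvValid string.toList k.toList
  | some m => m ∈ keys ∧ pvValid string.toList m.toList ∧ m.toList.length ≤ c ∧
      ∀ k ∈ keys, pvValid string.toList k.toList → k.toList.length ≤ c →
        k.toList.length ≤ m.toList.length

-- r is the (unique) answer: the longest non-empty key that is a prefix of string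
def pvGood (string : String) (keys : List String) : Option String → Prop
  | none => ∀ k ∈ keys, ¬ pvValid string.toList k.toList
  | some m => m ∈ keys ∧ pvValid string.toList m.toList ∧
      ∀ k ∈ keys, pvValid string.toList k.toList → k.toList.length ≤ m.toList.length

lemma pvString_toList_inj {a b : String} (h : a.toList = b.toList) : a = b := by
  simpa using congrArg String.ofList h

lemma pvGood_unique {string : String} {keys : List String} {r₁ r₂ : Option String}
    (h₁ : pvGood string keys r₁) (h₂ : pvGood string keys r₂) : r₁ = r₂ := by
  match r₁, r₂ with
  | none, none => rfl
  | none, some m => exact absurd h₂.2.1 (h₁ m h₂.1)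
  | some m, none => exact absurd h₁.2.1 (h₂ m h₁.1)
  | some m₁, some m₂ =>
    obtain ⟨hm₁, hv₁, hmax₁⟩ := h₁
    obtain ⟨hm₂, hv₂, hmax₂⟩ := h₂
    have hle₁ : m₁.toList.length ≤ m₂.toList.length := hmax₂ m₁ hm₁ hv₁
    have hle₂ : m₂.toList.length ≤ m₁.toList.length := hmax₁ m₂ hm₂ hv₂
    have hp : m₁.toList <+: m₂.toList :=
      List.prefix_of_prefix_length_le hv₁.2 hv₂.2 hle₁
    have : m₁.toList = m₂.toList := hp.eq_of_length (le_antisymm hle₁ hle₂)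
    exact congrArg some (pvString_toList_inj this)

-- ----- B side -----

lemma pvGood_foldl (string : String) :
    ∀ (keys seen : List String) (acc : Option String),
    pvGood string seen acc →
    pvGood string (seen ++ keys)
      (keys.foldl (fun longest k =>
        if (k ≠ "" && PySem.Str.startswith string k &&
            (match longest with
             | none => true
             | some m => decide (PySem.Str.len m < PySem.Str.len k)))
        then some k else longest) acc) := by
  intro keys
  induction keys with
  | nil => intro seen acc h; simpa using h
  | cons k rest ih =>
    intro seen acc h
    have hrw : seen ++ k :: rest = (seen ++ [k]) ++ rest := by simp
    rw [hrw, List.foldl_cons]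
    apply ih
    -- one step preserves pvGood
    have hmem : ∀ k' : String, k' ∈ seen ++ [k] → k' ∈ seen ∨ k' = k := by
      intro k' hk'; simpa using hk'
    have hswiff : PySem.Str.startswith string k = true ↔ k.toList <+: string.toList := by
      rw [PySem.Str.startswith_eq, PySem.Chars.startswith_iff]
    have hneiff : (k ≠ "") ↔ k.toList ≠ [] := by
      constructor
      · intro h0 h1
        exact h0 (pvString_toList_inj (by simpa using h1))
      · intro h0 h1; subst h1; exact h0 rfl
    rcases acc with _ | m
    · -- acc = none
      by_cases hc : (k ≠ "" && PySem.Str.startswith string k) = true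
      · simp only [hc]
        simp only [Bool.and_eq_true, decide_eq_true_eq] at hc
        refine ⟨by simp, ⟨hneiff.1 hc.1, hswiff.1 hc.2⟩, ?_⟩
        intro k' hk' hv'
        rcases hmem k' hk' with h' | h'
        · exact absurd hv' (h k' h')
        · subst h'; exact le_refl _
      · have : (k ≠ "" && PySem.Str.startswith string k && true) = false := by
          simp only [Bool.and_true]; exact Bool.eq_false_iff.mpr hc
        simp only [this, Bool.false_eq_true, if_false]
        intro k' hk'
        rcases hmem k' hk' with h' | h'
        · exact h k' h'
        · subst h'
          intro hv'
          apply hc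
          simp only [Bool.and_eq_true, decide_eq_true_eq]
          exact ⟨hneiff.2 hv'.1, hswiff.2 hv'.2⟩
    · -- acc = some m
      obtain ⟨hm, hv, hmax⟩ := h
      by_cases hc : (k ≠ "" && PySem.Str.startswith string k &&
          decide (PySem.Str.len m < PySem.Str.len k)) = true
      · simp only [hc]
        simp only [Bool.and_eq_true, decide_eq_true_eq] at hc
        refine ⟨by simp, ⟨hneiff.1 hc.1.1, hswiff.1 hc.1.2⟩, ?_⟩
        intro k' hk' hv'
        rcases hmem k' hk' with h' | h'
        · have h1 := hmax k' h' hv'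
          have h2 := hc.2
          simp only [PySem.Str.len_eq] at h2
          omega
        · subst h'; exact le_refl _
      · simp only [Bool.eq_false_iff.mpr hc, Bool.false_eq_true, if_false]
        refine ⟨by simp [hm], hv, ?_⟩
        intro k' hk' hv'
        rcases hmem k' hk' with h' | h'
        · exact hmax k' h' hv'
        · subst h'
          by_contra hgt
          apply hc
          simp only [Bool.and_eq_true, decide_eq_true_eq, PySem.Str.len_eq]
          exact ⟨⟨hneiff.2 hv'.1, hswiff.2 hv'.2⟩, by omega⟩

lemma pvGood_alt (string : String) (keys : List String) :
    pvGood string keys (nextmatch_alt string keys) := by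
  have := pvGood_foldl string keys [] none (by intro k hk; simp at hk)
  simpa [nextmatch_alt] using this

-- ----- A side -----

lemma pvSubstr_toList (string : String) (i : Nat) :
    (PySem.Str.slice string none (some ((i : Int) + 1))).toList
      = string.toList.take (i + 1) := by
  simp only [PySem.Str.toList_slice, PySem.Chars.slice_eq_listSlice]
  have h1 : ((i : Int) + 1) = ((i + 1 : Nat) : Int) := by omega
  rw [h1, PySem.List.slice_to_natCast]

lemma pvGoA (string : String) (keys : List String) :
    ∀ (d i : Nat) (acc : Option String), i + d = string.toList.length →
    pvGoodUpTo string keys i acc →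
    pvGood string keys
      (nextmatchGo string keys
        (PySem.List.pyRange (i : Int) (string.toList.length : Int) 1) acc) := by
  intro d
  induction d with
  | zero =>
    intro i acc hi h
    rw [PySem.List.pyRange_one_eq_nil (by omega)]
    simp only [nextmatchGo]
    match acc, h with
    | none, h =>
      intro k hk hv
      have hl := hv.2.length_le
      exact h k hk (by omega) hv
    | some m, h =>
      exact ⟨h.1, h.2.1, fun k hk hv => h.2.2.2 k hk hv (by have := hv.2.length_le; omega)⟩
  | succ d ih =>
    intro i acc hi h
    rw [PySem.List.pyRange_one_cons (by omega)]
    simp only [nextmatchGo]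
    have hsub : (PySem.Str.slice string none (some ((i : Int) + 1))).toList
        = string.toList.take (i + 1) := pvSubstr_toList string i
    set substr := PySem.Str.slice string none (some ((i : Int) + 1)) with hsubstr
    have hlen_sub : substr.toList.length = i + 1 := by
      rw [hsub, List.length_take]; omega
    have hpre : ∀ k : String, k.toList <+: string.toList → i + 1 ≤ k.toList.length →
        substr.toList <+: k.toList := by
      intro k hk hkl
      obtain ⟨t, ht⟩ := hk
      rw [hsub, ← ht, List.take_append_of_le_length hkl]
      exact List.take_prefix _ _
    split_ifs with hfilt hcont
    · -- candidates empty: break; no valid key is longer than i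
      have hnosw : ∀ k ∈ keys, ¬ PySem.Str.startswith k substr = true := by
        rw [List.filter_eq_nil_iff] at hfilt; exact hfilt
      have hshort : ∀ k : String, k ∈ keys → pvValid string.toList k.toList →
          k.toList.length ≤ i := by
        intro k hk hv
        by_contra hlong
        apply hnosw k hk
        rw [PySem.Str.startswith_eq, PySem.Chars.startswith_iff]
        exact hpre k hv.2 (by omega)
      match acc, h with
      | none, h => exact fun k hk hv => h k hk (hshort k hk hv) hv
      | some m, h =>
        exact ⟨h.1, h.2.1, fun k hk hv => h.2.2.2 k hk hv (hshort k hk hv)⟩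
    · -- no break, substr is itself a key: recurse with longest = substr
      have hcast : (i : Int) + 1 = ((i + 1 : Nat) : Int) := by omega
      rw [hcast]
      apply ih (i + 1) (some substr) (by omega)
      have hmem : substr ∈ keys := List.contains_iff_mem.1 hcont
      refine ⟨hmem, ⟨?_, ?_⟩, by omega, ?_⟩
      · intro h0; rw [h0] at hlen_sub; simp at hlen_sub
      · rw [hsub]; exact List.take_prefix _ _
      · intro k hk hv hkl; omega
    · -- no break, substr not a key: recurse with longest unchanged
      have hcast : (i : Int) + 1 = ((i + 1 : Nat) : Int) := by omega
      rw [hcast]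
      apply ih (i + 1) acc (by omega)
      have hnew : ∀ k : String, k ∈ keys → pvValid string.toList k.toList →
          k.toList.length ≤ i + 1 → k.toList.length ≤ i := by
        intro k hk hv hkl
        by_contra hlong
        have hkeq : k.toList = substr.toList := by
          rw [hsub]
          have := List.prefix_iff_eq_take.1 hv.2
          rw [show k.toList.length = i + 1 by omega] at this
          exact this
        have : k = substr := pvString_toList_inj hkeq
        subst this
        exact hcont (List.contains_iff_mem.2 hk)
      match acc, h with
      | none, h => exact fun k hk hkl hv => h k hk (hnew k hk hv hkl) hv
      | some m, h =>
        exact ⟨h.1, h.2.1, by have := h.2.2.1; omega,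
          fun k hk hv hkl => h.2.2.2 k hk hv (hnew k hk hv hkl)⟩

-- ===== VERDICT (by name: the statement is the Claim_ definition above) =====
theorem nextmatch_spec : Claim_equal_nextmatch := by
  intro string keys _
  unfold Spec_nextmatch
  apply pvGood_unique (h₂ := pvGood_alt string keys)
  have := pvGoA string keys string.toList.length 0 none (by omega)
    (by intro k hk hl hv; exact hv.1 (List.eq_nil_of_length_eq_zero (by omega)))
  simpa [nextmatch] using this
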